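-- pv_equiv track=rewrite | github.com/codeit-bootcamp-frontend/0-study-algorithms | 프로그래머스/3/132266. 부대복귀/부대복귀.py | solution
-- ===== SOURCE A (Python) =====
-- from collections import deque
--
-- def solution(n, roads, sources, destination):
--     len_sources = len(sources)
--     # 도착점에서 다른 노드들로의 최단 거리를 구하자
--     # 그래프 및 방문 표시 만들기
--     graph = {}
--     visited = []
--     min_distance_map = []
--     for i in range(n):
--         graph[i+1] = []
--         visited.append(False)
--         min_distance_map.append(-1)
--     for road in roads:
--         for i in range(2):
--             graph[road[1-i]].append(road[i])
--
--     # BFS 초기 설정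
--     queue = deque()
--     queue.append((destination, 0))
--     visited[destination-1] = True
--     # BFS 순회
--     while queue:
--         pos, move = queue.popleft()
--         if min_distance_map[pos-1] == -1:
--             min_distance_map[pos-1] = move
--         else:
--             min_distance_map[pos-1] = min(min_distance_map[pos-1], move)
--         for next_pos in graph[pos]:
--             if not visited[next_pos-1]:
--                 queue.append((next_pos, move+1))
--                 visited[next_pos-1] = True
--
--     # destination에서 각 source로의 최단 거리
--     answer = []
--     for i in range(len_sources):
--         answer.append(min_distance_map[sources[i]-1])
--
--     return answer
-- ===== SOURCE B (Python) =====
-- def solution(n, roads, sources, destination):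
--     # fixed-point relaxation (unit-weight Bellman-Ford, pull style): no queue, no
--     # frontier -- each round every still-unlabelled vertex pulls a label from any
--     # neighbour labelled with the current distance, until a round changes nothing
--     adj = [[] for _ in range(n + 1)]
--     for road in roads:
--         a, b = road[0], road[1]
--         adj[a].append(b)
--         adj[b].append(a)
--     dist = [-1] * n
--     dist[destination - 1] = 0
--     d = 0
--     changed = True
--     while changed:
--         changed = False
--         for u in range(1, n + 1):
--             if dist[u - 1] == -1 and any(dist[x - 1] == d for x in adj[u]):
--                 dist[u - 1] = d + 1
--                 changed = True
--         d += 1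
--     return [dist[s - 1] for s in sources]
-- ===== Notes on version B (the rewrite author's own statement) =====
-- stated objective: alternative
-- what changed: A's BFS (a deque of (node,distance) tuples, a separate visited array and a distance map written at pop time) is replaced by queue-free fixed-point relaxation, i.e. unit-weight Bellman-Ford in pull style: a single dist array is swept round by round -- every still-unlabelled vertex scans its own adjacency list and takes label d+1 if some neighbour is labelled d -- until a whole sweep changes nothing; no queue, frontier or visited structure exists.
import Mathlib
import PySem

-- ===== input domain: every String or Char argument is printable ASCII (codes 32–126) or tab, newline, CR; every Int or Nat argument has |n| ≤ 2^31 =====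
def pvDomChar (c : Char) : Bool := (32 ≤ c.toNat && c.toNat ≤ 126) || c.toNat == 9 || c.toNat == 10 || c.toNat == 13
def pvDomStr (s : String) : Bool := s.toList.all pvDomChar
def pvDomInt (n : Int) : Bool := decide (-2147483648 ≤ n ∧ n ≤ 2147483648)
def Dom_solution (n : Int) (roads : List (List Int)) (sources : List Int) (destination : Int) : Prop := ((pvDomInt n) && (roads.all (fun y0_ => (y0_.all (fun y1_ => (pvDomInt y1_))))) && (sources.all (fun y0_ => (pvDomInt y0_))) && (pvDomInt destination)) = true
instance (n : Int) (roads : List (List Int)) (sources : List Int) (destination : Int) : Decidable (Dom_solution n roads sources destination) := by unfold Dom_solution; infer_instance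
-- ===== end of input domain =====

-- B replaces A's BFS (deque of (node,distance) tuples, separate visited array, distance map
-- written at pop time) by queue-free fixed-point relaxation (unit-weight Bellman-Ford, pull
-- style): one dist array is swept round by round — every still-unlabelled vertex pulls label
-- d+1 if some neighbour is labelled d — until a whole sweep changes nothing.

-- ===== PORT A =====
-- one step of A's inner `for next_pos in graph[pos]` loop (the enqueue scan)
def scanA (nbrs : List Int) (q : List (Int × Int)) (v : List Bool) (move : Int) :
    List (Int × Int) × List Bool :=
  nbrs.foldl (fun s x =>
    if PySem.List.pyGetD s.2 (x - 1) true = false then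
      (s.1 ++ [(x, move + 1)], PySem.List.pySetD s.2 (x - 1) true)
    else s) (q, v)
-- default `true` where Python's visited[next_pos-1] would raise IndexError (excluded by Pre_)

-- the next three lemmas exist only for bfsA's decreasing_by (the port cites scanA_measure by name)
lemma count_set_flip {α : Type} [BEq α] [LawfulBEq α] :
    ∀ (xs : List α) (j : Nat), j < xs.length → ∀ (b c d : α), xs.getD j d = c → (b == c) = false →
    (xs.set j b).count c + 1 = xs.count c := by
  intro xs
  induction xs with
  | nil => intro j h; simp at h
  | cons y ys ih =>
    intro j hj b c d hv hb
    cases j with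
    | zero =>
      simp only [List.getD_cons_zero] at hv
      subst hv
      simp [List.count_cons, hb]
    | succ k =>
      simp only [List.getD_cons_succ] at hv
      simp only [List.length_cons, Nat.succ_lt_succ_iff] at hj
      have := ih k hj b c d hv hb
      simp [List.count_cons]
      omega

lemma pyAt_flip {α : Type} (xs : List α) (i : Int) (c : α)
    (h : PySem.List.pyGet? xs i = some c) :
    ∃ j, j < xs.length ∧ xs[j]? = some c ∧ ∀ b, PySem.List.pySetD xs i b = xs.set j b := by
  simp only [PySem.List.pyGet?] at h
  cases hk : PySem.List.pyIdx? xs.length i with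
  | none => rw [hk] at h; simp at h
  | some k =>
    rw [hk] at h
    simp only [Option.bind_some] at h
    refine ⟨k, ?_, h, ?_⟩
    · exact (List.getElem?_eq_some_iff.mp h).1
    · intro b
      simp [PySem.List.pySetD, PySem.List.pySet?, hk]

lemma scanA_measure : ∀ (nbrs : List Int) (q : List (Int × Int)) (v : List Bool) (move : Int),
    2 * (scanA nbrs q v move).2.count false + (scanA nbrs q v move).1.length ≤
      2 * v.count false + q.length := by
  intro nbrs
  induction nbrs with
  | nil => intro q v move; simp [scanA]
  | cons x nb ih =>
    intro q v move
    by_cases hx : PySem.List.pyGetD v (x - 1) true = false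
    · have hsome : PySem.List.pyGet? v (x - 1) = some false := by
        simp only [PySem.List.pyGetD] at hx
        cases hg : PySem.List.pyGet? v (x - 1) with
        | none => rw [hg] at hx; simp at hx
        | some b => rw [hg] at hx; simp at hx; rw [hx]
      obtain ⟨j, hj, hval, hset⟩ := pyAt_flip v (x - 1) false hsome
      have hflip : (v.set j true).count false + 1 = v.count false :=
        count_set_flip v j hj true false false (by simpa [List.getD_eq_getElem?_getD, hval]) rfl
      have hstep : scanA (x :: nb) q v move
          = scanA nb (q ++ [(x, move + 1)]) (v.set j true) move := by
        simp [scanA, hx, hset]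
      rw [hstep]
      have h2 := ih (q ++ [(x, move + 1)]) (v.set j true) move
      simp only [List.length_append, List.length_cons, List.length_nil] at h2
      omega
    · have hstep : scanA (x :: nb) q v move = scanA nb q v move := by
        simp [scanA, hx]
      rw [hstep]
      exact ih q v move

-- A's `while queue` loop; graph.getD pos [] is graph[pos] (KeyError excluded by Pre_)
def bfsA (graph : PySem.Dict Int (List Int)) :
    List (Int × Int) → List Bool → List Int → List Int
  | [], _, m => m
  | (pos, move) :: q, v, m =>
    let cur := PySem.List.pyGetD m (pos - 1) 0
    let m' := if cur = -1 then PySem.List.pySetD m (pos - 1) move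
              else PySem.List.pySetD m (pos - 1) (min cur move)
    let s := scanA (graph.getD pos []) q v move
    bfsA graph s.1 s.2 m'
  termination_by q v _ => 2 * v.count false + q.length
  decreasing_by
    have := scanA_measure (graph.getD pos []) q v move
    simp only [List.length_cons]
    omega

-- A's first loop builds graph/visited/min_distance_map together
def initA (n : Int) : PySem.Dict Int (List Int) × List Bool × List Int :=
  (PySem.List.pyRange 0 n 1).foldl
    (fun st i => (st.1.insert (i + 1) ([] : List Int), st.2.1 ++ [false], st.2.2 ++ [(-1 : Int)]))
    (PySem.Dict.empty, [], [])

def graphA (n : Int) (roads : List (List Int)) : PySem.Dict Int (List Int) :=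
  roads.foldl
    (fun g road =>
      (PySem.List.pyRange 0 2 1).foldl
        (fun g i =>
          g.modify (PySem.List.pyGetD road (1 - i) 0) []
            (fun l => l ++ [PySem.List.pyGetD road i 0])) g)
    (initA n).1

def solution (n : Int) (roads : List (List Int)) (sources : List Int) (destination : Int) : List Int :=
  let lenSources : Int := PySem.List.len sources
  let visited := PySem.List.pySetD (initA n).2.1 (destination - 1) true
  let mdm := bfsA (graphA n roads) [(destination, 0)] visited (initA n).2.2
  (PySem.List.pyRange 0 lenSources 1).foldl
    (fun acc i => acc ++ [PySem.List.pyGetD mdm (PySem.List.pyGetD sources i 0 - 1) 0]) []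

-- ===== PORT B =====
-- adj[i].append(w), with Python's (negative-wrapping) list indexing
def appendAt (g : List (List Int)) (i : Int) (w : Int) : List (List Int) :=
  PySem.List.pySetD g i (PySem.List.pyGetD g i [] ++ [w])

def graphB (n : Int) (roads : List (List Int)) : List (List Int) :=
  roads.foldl
    (fun g road =>
      appendAt (appendAt g (PySem.List.pyGetD road 0 0) (PySem.List.pyGetD road 1 0))
        (PySem.List.pyGetD road 1 0) (PySem.List.pyGetD road 0 0))
    ((PySem.List.pyRange 0 (n + 1) 1).map (fun _ => ([] : List Int)))

-- body of B's `for u in range(1, n + 1)` scan: relabel u if unlabelled and a neighbour is at d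
def sweepStep (gB : List (List Int)) (d : Int) (s : List Int × Bool) (u : Int) :
    List Int × Bool :=
  if PySem.List.pyGetD s.1 (u - 1) 0 = -1 ∧
      (PySem.List.pyGetD gB u []).any (fun x => PySem.List.pyGetD s.1 (x - 1) 0 == d) = true then
    (PySem.List.pySetD s.1 (u - 1) (d + 1), true)
  else s

-- one whole round of B: sweep every vertex once, tracking the `changed` flag
def sweepRound (gB : List (List Int)) (n d : Int) (dist : List Int) : List Int × Bool :=
  (PySem.List.pyRange 1 (n + 1) 1).foldl (sweepStep gB d) (dist, false)

-- B's `while changed` loop, made total by testing the count of -1 instead of the flag: in every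
-- reachable state d ≥ 0, where changed = true holds exactly when the sweep relabelled some -1
-- cell to d+1, i.e. exactly when the count of -1 dropped
def sweepLoop (gB : List (List Int)) (n : Int) : Int → List Int → List Int
  | d, dist =>
    if _h : (sweepRound gB n d dist).1.count (-1) < dist.count (-1) then
      sweepLoop gB n (d + 1) (sweepRound gB n d dist).1
    else (sweepRound gB n d dist).1
  termination_by d dist => dist.count (-1)
  decreasing_by exact _h

def solution_alt (n : Int) (roads : List (List Int)) (sources : List Int) (destination : Int) : List Int :=
  let dist := PySem.List.pySetD (List.replicate n.toNat (-1)) (destination - 1) 0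
  let final := sweepLoop (graphB n roads) n 0 dist
  sources.map (fun s => PySem.List.pyGetD final (s - 1) 0)

-- ===== PRECONDITION & SPEC =====
-- Pre_ = the natural domain of the problem, exactly where A returns: destination a node of 1..n,
-- every road a pair of nodes of 1..n (extra columns ignored), every source inside Python's
-- index range for the distance list (A raises KeyError/IndexError on everything else).
def Pre_solution (n : Int) (roads : List (List Int)) (sources : List Int) (destination : Int) : Prop :=
  1 ≤ destination ∧ destination ≤ n ∧
  (∀ road ∈ roads, 2 ≤ road.length ∧ ∀ x ∈ road.take 2, 1 ≤ x ∧ x ≤ n) ∧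
  (∀ s ∈ sources, 1 - n ≤ s ∧ s ≤ n)

instance (n : Int) (roads : List (List Int)) (sources : List Int) (destination : Int) :
    Decidable (Pre_solution n roads sources destination) := by
  unfold Pre_solution; infer_instance

def pvWitness_solution : Int × List (List Int) × List Int × Int :=
  (3, [[1, 2], [2, 3]], [1, 3], 2)

def Spec_solution (n : Int) (roads : List (List Int)) (sources : List Int) (destination : Int)
    (out : List Int) : Prop := out = solution_alt n roads sources destination

instance (n : Int) (roads : List (List Int)) (sources : List Int) (destination : Int)
    (out : List Int) : Decidable (Spec_solution n roads sources destination out) := by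
  unfold Spec_solution; infer_instance

-- ===== CLAIM (what is proved, stated in full; the proofs are below) =====
def Claim_equal_solution : Prop := ∀ (n : Int) (roads : List (List Int)) (sources : List Int) (destination : Int), Dom_solution n roads sources destination → Pre_solution n roads sources destination → Spec_solution n roads sources destination (solution n roads sources destination)

-- ===== LEMMAS AND PROOFS =====

-- ---- proof-side intermediate model: a level-synchronised BFS, the stepping stone between
-- ---- A's queue BFS and B's fixed-point sweeps (these defs are used by proofs only)
def innerB (level : Int) (s : List Int × List Int) (nbrs : List Int) : List Int × List Int :=
  nbrs.foldl (fun s x =>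
    if PySem.List.pyGetD s.2 (x - 1) 0 = -1 then
      (s.1 ++ [x], PySem.List.pySetD s.2 (x - 1) level)
    else s) s

def stepB (graph : List (List Int)) (level : Int) (acc : List Int × List Int)
    (frontier : List Int) : List Int × List Int :=
  frontier.foldl (fun s u => innerB level s (PySem.List.pyGetD graph u [])) acc

lemma innerB_cons (L : Int) (s : List Int × List Int) (x : Int) (nb : List Int) :
    innerB L s (x :: nb) =
      if PySem.List.pyGetD s.2 (x - 1) 0 = -1 then
        innerB L (s.1 ++ [x], PySem.List.pySetD s.2 (x - 1) L) nb
      else innerB L s nb := by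
  by_cases h : PySem.List.pyGetD s.2 (x - 1) 0 = -1 <;> simp [innerB, h]

lemma innerB_count (L : Int) (hL : L ≠ -1) :
    ∀ (nb : List Int) (G dist : List Int),
      (innerB L (G, dist) nb).2.count (-1) + (innerB L (G, dist) nb).1.length =
        dist.count (-1) + G.length := by
  intro nb
  induction nb with
  | nil => intro G dist; simp [innerB]
  | cons x nb ih =>
    intro G dist
    rw [innerB_cons]
    by_cases hx : PySem.List.pyGetD dist (x - 1) 0 = -1
    · rw [if_pos hx]
      have hsome : PySem.List.pyGet? dist (x - 1) = some (-1) := by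
        simp only [PySem.List.pyGetD] at hx
        cases hg : PySem.List.pyGet? dist (x - 1) with
        | none => rw [hg] at hx; simp at hx
        | some b => rw [hg] at hx; simp at hx; rw [hx]
      obtain ⟨j, hj, hval, hset⟩ := pyAt_flip dist (x - 1) (-1) hsome
      have hflip : (dist.set j L).count (-1) + 1 = dist.count (-1) :=
        count_set_flip dist j hj L (-1) 0 (by simp [List.getD_eq_getElem?_getD, hval])
          (by simp [hL])
      rw [hset]
      have h2 := ih (G ++ [x]) (dist.set j L)
      simp only [List.length_append, List.length_cons, List.length_nil] at h2 ⊢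
      omega
    · rw [if_neg hx]
      exact ih G dist

lemma stepB_count (gB : List (List Int)) (L : Int) (hL : L ≠ -1) :
    ∀ (frontier : List Int) (G dist : List Int),
      (stepB gB L (G, dist) frontier).2.count (-1) + (stepB gB L (G, dist) frontier).1.length =
        dist.count (-1) + G.length := by
  intro frontier
  induction frontier with
  | nil => intro G dist; simp [stepB]
  | cons u fr ih =>
    intro G dist
    have hstep : stepB gB L (G, dist) (u :: fr)
        = stepB gB L (innerB L (G, dist) (PySem.List.pyGetD gB u [])) fr := by
      simp [stepB]
    rw [hstep]
    have h1 := innerB_count L hL (PySem.List.pyGetD gB u []) G dist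
    have h2 := ih (innerB L (G, dist) (PySem.List.pyGetD gB u [])).1
      (innerB L (G, dist) (PySem.List.pyGetD gB u [])).2
    rw [Prod.mk.eta] at h2
    omega

def bfsB (graph : List (List Int)) : List Int → Int → List Int → List Int
  | [], _, dist => dist
  | f :: frontier, level, dist =>
    let s := stepB graph (level + 1) ([], dist) (f :: frontier)
    if _h : s.2.count (-1) < dist.count (-1) then bfsB graph s.1 (level + 1) s.2 else s.2
  termination_by _ _ dist => dist.count (-1)
  decreasing_by exact _h

lemma bfsA_nil (gA : PySem.Dict Int (List Int)) (v : List Bool) (m : List Int) :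
    bfsA gA [] v m = m := by
  rw [bfsA]

lemma bfsA_cons (gA : PySem.Dict Int (List Int)) (pos move : Int) (q : List (Int × Int))
    (v : List Bool) (m : List Int) :
    bfsA gA ((pos, move) :: q) v m =
      bfsA gA (scanA (gA.getD pos []) q v move).1 (scanA (gA.getD pos []) q v move).2
        (if PySem.List.pyGetD m (pos - 1) 0 = -1 then PySem.List.pySetD m (pos - 1) move
         else PySem.List.pySetD m (pos - 1)
           (min (PySem.List.pyGetD m (pos - 1) 0) move)) := by
  rw [bfsA]

lemma bfsB_nil (gB : List (List Int)) (L : Int) (dist : List Int) :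
    bfsB gB [] L dist = dist := by
  rw [bfsB]

lemma getD_indep {α : Type} (xs : List α) (j : Nat) (h : j < xs.length) (d d' : α) :
    xs.getD j d = xs.getD j d' := by
  simp [List.getD_eq_getElem?_getD, List.getElem?_eq_getElem h]

lemma getD_set {α : Type} (xs : List α) (j : Nat) (hj : j < xs.length) (a : α) (j' : Nat) (d : α) :
    (xs.set j a).getD j' d = if j' = j then a else xs.getD j' d := by
  simp only [List.getD_eq_getElem?_getD, List.getElem?_set]
  split
  · rename_i h; subst h; simp [hj]
  · rename_i h; rw [if_neg (fun hh => h hh.symm)]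

lemma pyGetD_getD {α : Type} (xs : List α) (x : Int) (hx : 1 ≤ x) (d : α) :
    PySem.List.pyGetD xs (x - 1) d = xs.getD (x - 1).toNat d := by
  rw [PySem.List.pyGetD_of_nonneg xs d (by omega)]

lemma pySetD_set {α : Type} (xs : List α) (x : Int) (hx : 1 ≤ x) (a : α) :
    PySem.List.pySetD xs (x - 1) a = xs.set (x - 1).toNat a :=
  PySem.List.pySetD_of_nonneg xs a (by omega)

lemma scanA_cons (x : Int) (nb : List Int) (q : List (Int × Int)) (v : List Bool) (mv : Int) :
    scanA (x :: nb) q v mv =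
      if PySem.List.pyGetD v (x - 1) true = false then
        scanA nb (q ++ [(x, mv + 1)]) (PySem.List.pySetD v (x - 1) true) mv
      else scanA nb q v mv := by
  by_cases h : PySem.List.pyGetD v (x - 1) true = false <;> simp [scanA, h]

lemma scan_sim (n : Int) :
    ∀ (nb : List Int), (∀ x ∈ nb, 1 ≤ x ∧ x ≤ n) → ∀ (d : Int), 0 ≤ d →
    ∀ (q : List (Int × Int)) (G : List Int) (v : List Bool) (dist : List Int),
    v.length = n.toNat → dist.length = n.toNat →
    (∀ j : Nat, j < n.toNat → (v.getD j false = true ↔ dist.getD j 0 ≠ -1)) →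
    ∃ new : List Int,
      (scanA nb q v d).1 = q ++ new.map (fun x => (x, d + 1)) ∧
      (innerB (d + 1) (G, dist) nb).1 = G ++ new ∧
      (scanA nb q v d).2.length = n.toNat ∧
      (innerB (d + 1) (G, dist) nb).2.length = n.toNat ∧
      (∀ j : Nat, j < n.toNat →
        (scanA nb q v d).2.getD j false = (if (j : Int) + 1 ∈ new then true else v.getD j false)) ∧
      (∀ j : Nat, j < n.toNat →
        (innerB (d + 1) (G, dist) nb).2.getD j 0 =
          (if (j : Int) + 1 ∈ new then d + 1 else dist.getD j 0)) ∧
      new.Nodup ∧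
      (∀ x ∈ new, (1 ≤ x ∧ x ≤ n) ∧ dist.getD (x - 1).toNat 0 = -1 ∧ x ∈ nb) ∧
      (scanA nb q v d).2.count false + new.length = v.count false := by
  intro nb
  induction nb with
  | nil =>
    intro _ d _ q G v dist hlv hld hinv
    exact ⟨[], by simp [scanA], by simp [innerB], hlv, hld,
      fun j hj => by simp [scanA], fun j hj => by simp [innerB], by simp, by simp,
      by simp [scanA]⟩
  | cons x nb ih =>
    intro hnb d hd q G v dist hlv hld hinv
    have hx1 : 1 ≤ x := (hnb x (by simp)).1
    have hx2 : x ≤ n := (hnb x (by simp)).2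
    have hnb' : ∀ y ∈ nb, 1 ≤ y ∧ y ≤ n := fun y hy => hnb y (by simp [hy])
    set j : Nat := (x - 1).toNat with hjdef
    have hj : j < n.toNat := by omega
    have hjv : j < v.length := by omega
    have hjd : j < dist.length := by omega
    have hxj : ((j : Int)) + 1 = x := by omega
    have hcondA : PySem.List.pyGetD v (x - 1) true = v.getD j false := by
      rw [pyGetD_getD v x hx1 true]
      exact getD_indep v j hjv true false
    have hcondB : PySem.List.pyGetD dist (x - 1) 0 = dist.getD j 0 :=
      pyGetD_getD dist x hx1 0
    by_cases hvis : dist.getD j 0 = -1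
    · -- both sides discover x
      have hvf : v.getD j false = false := by
        rcases Bool.eq_false_or_eq_true (v.getD j false) with h | h
        · exact absurd hvis ((hinv j hj).mp h)
        · exact h
      have hsA : scanA (x :: nb) q v d
          = scanA nb (q ++ [(x, d + 1)]) (v.set j true) d := by
        rw [scanA_cons, if_pos (by rw [hcondA]; exact hvf), pySetD_set v x hx1 true]
      have hsB : innerB (d + 1) (G, dist) (x :: nb)
          = innerB (d + 1) (G ++ [x], dist.set j (d + 1)) nb := by
        rw [innerB_cons, if_pos (by rw [hcondB]; exact hvis)]
        simp only [pySetD_set dist x hx1 (d + 1), ← hjdef]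
      have hinv' : ∀ j' : Nat, j' < n.toNat →
          ((v.set j true).getD j' false = true ↔ (dist.set j (d + 1)).getD j' 0 ≠ -1) := by
        intro j' hj'
        rw [getD_set v j hjv true j' false, getD_set dist j hjd (d + 1) j' 0]
        by_cases hjj : j' = j
        · simp [hjj]; omega
        · simp only [if_neg hjj]; exact hinv j' hj'
      obtain ⟨new', e1, e2, e3, e4, e5, e6, e7, e8, e9⟩ :=
        ih hnb' d hd (q ++ [(x, d + 1)]) (G ++ [x]) (v.set j true) (dist.set j (d + 1))
          (by simpa using hlv) (by simpa using hld) hinv'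
      have hxnew : x ∉ new' := by
        intro hmem
        have := (e8 x hmem).2.1
        rw [show ((x : Int) - 1).toNat = j from rfl, getD_set dist j hjd (d + 1) j 0,
          if_pos rfl] at this
        omega
      refine ⟨x :: new', ?_, ?_, by rw [hsA]; exact e3, by rw [hsB]; exact e4, ?_, ?_, ?_, ?_, ?_⟩
      · rw [hsA, e1]; simp
      · rw [hsB, e2]; simp
      · intro j' hj'
        rw [hsA, e5 j' hj']
        by_cases hj'new : ((j' : Int)) + 1 ∈ new'
        · simp [hj'new]
        · rw [if_neg hj'new, getD_set v j hjv true j' false]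
          by_cases hjj : j' = j
          · subst hjj
            simp [hxj]
          · have : ((j' : Int)) + 1 ≠ x := by omega
            simp [hj'new, this, hjj]
      · intro j' hj'
        rw [hsB, e6 j' hj']
        by_cases hj'new : ((j' : Int)) + 1 ∈ new'
        · simp [hj'new]
        · rw [if_neg hj'new, getD_set dist j hjd (d + 1) j' 0]
          by_cases hjj : j' = j
          · subst hjj
            simp [hxj]
          · have : ((j' : Int)) + 1 ≠ x := by omega
            simp [hj'new, this, hjj]
      · exact List.Nodup.cons hxnew e7
      · intro y hy
        rcases List.mem_cons.mp hy with hy | hy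
        · subst hy
          exact ⟨⟨hx1, hx2⟩, hvis, by simp⟩
        · obtain ⟨hyb, hyd, hynb⟩ := e8 y hy
          have hyj : (y - 1).toNat ≠ j := by
            intro hh
            rw [hh, getD_set dist j hjd (d + 1) j 0, if_pos rfl] at hyd
            omega
          rw [getD_set dist j hjd (d + 1) (y - 1).toNat 0, if_neg hyj] at hyd
          exact ⟨hyb, hyd, by simp [hynb]⟩
      · have hflip : (v.set j true).count false + 1 = v.count false :=
          count_set_flip v j hjv true false false hvf rfl
        rw [hsA]
        simp only [List.length_cons]
        omega
    · -- x already seen: both sides skip it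
      have hvt : v.getD j false = true := by
        rcases Bool.eq_false_or_eq_true (v.getD j false) with h | h
        · exact h
        · exact absurd ((hinv j hj).mpr hvis) (by rw [h]; simp)
      have hsA : scanA (x :: nb) q v d = scanA nb q v d := by
        rw [scanA_cons, if_neg (by rw [hcondA, hvt]; simp)]
      have hsB : innerB (d + 1) (G, dist) (x :: nb) = innerB (d + 1) (G, dist) nb := by
        rw [innerB_cons, if_neg (by rw [hcondB]; exact hvis)]
      obtain ⟨new', e1, e2, e3, e4, e5, e6, e7, e8, e9⟩ :=
        ih hnb' d hd q G v dist hlv hld hinv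
      have hxnew : x ∉ new' := by
        intro hmem
        exact hvis (e8 x hmem).2.1
      refine ⟨new', by rw [hsA]; exact e1, by rw [hsB]; exact e2, by rw [hsA]; exact e3,
        by rw [hsB]; exact e4, ?_, ?_, e7, ?_, by rw [hsA]; exact e9⟩
      · intro j' hj'
        rw [hsA]; exact e5 j' hj'
      · intro j' hj'
        rw [hsB]; exact e6 j' hj'
      · intro y hy
        obtain ⟨hyb, hyd, hynb⟩ := e8 y hy
        exact ⟨hyb, hyd, by simp [hynb]⟩

lemma bfsB_cons (gB : List (List Int)) (f : Int) (F : List Int) (L : Int) (dist : List Int)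
    (hL : L + 1 ≠ -1) :
    bfsB gB (f :: F) L dist =
      bfsB gB (stepB gB (L + 1) ([], dist) (f :: F)).1 (L + 1)
        (stepB gB (L + 1) ([], dist) (f :: F)).2 := by
  rw [bfsB]
  split
  · rfl
  · rename_i hng
    have hc := stepB_count gB (L + 1) hL (f :: F) [] dist
    simp only [List.length_nil, Nat.add_zero] at hc
    have h0 : (stepB gB (L + 1) ([], dist) (f :: F)).1.length = 0 := by omega
    have h1 : (stepB gB (L + 1) ([], dist) (f :: F)).1 = [] := List.eq_nil_of_length_eq_zero h0
    rw [h1, bfsB]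

lemma bridge (gA : PySem.Dict Int (List Int)) (gB : List (List Int)) (n : Int)
    (Hg : ∀ u : Int, 1 ≤ u → gA.getD u [] = PySem.List.pyGetD gB u [])
    (Hb : ∀ u : Int, 1 ≤ u → ∀ x ∈ gA.getD u [], 1 ≤ x ∧ x ≤ n) :
    ∀ (K : Nat) (F G : List Int) (d : Int) (v : List Bool) (m dist : List Int),
    2 * (2 * v.count false + F.length + G.length) + (if F = [] then 1 else 0) ≤ K →
    0 ≤ d →
    v.length = n.toNat → m.length = n.toNat → dist.length = n.toNat →
    (∀ x ∈ F ++ G, 1 ≤ x ∧ x ≤ n) →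
    (F ++ G).Nodup →
    (∀ x ∈ F, dist.getD (x - 1).toNat 0 = d) →
    (∀ x ∈ G, dist.getD (x - 1).toNat 0 = d + 1) →
    (∀ j : Nat, j < n.toNat → (v.getD j false = true ↔ dist.getD j 0 ≠ -1)) →
    (∀ j : Nat, j < n.toNat →
      (((j : Int) + 1 ∈ F ++ G → m.getD j 0 = -1) ∧
       ((j : Int) + 1 ∉ F ++ G → m.getD j 0 = dist.getD j 0))) →
    bfsA gA (F.map (fun x => (x, d)) ++ G.map (fun x => (x, d + 1))) v m =
      bfsB gB (stepB gB (d + 1) (G, dist) F).1 (d + 1) (stepB gB (d + 1) (G, dist) F).2 := by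
  intro K
  induction K using Nat.strong_induction_on with
  | _ K ih =>
  intro F G d v m dist hK hd hlv hlm hld hbound hnd hF hG hinv hm
  cases F with
  | nil =>
    have hsnil : stepB gB (d + 1) (G, dist) [] = (G, dist) := rfl
    rw [hsnil]
    cases G with
    | nil =>
      simp only [List.map_nil, List.nil_append]
      rw [bfsA_nil, bfsB_nil]
      apply List.ext_getElem (by omega)
      intro j h1 h2
      have hj : j < n.toNat := by omega
      have := (hm j hj).2 (by simp)
      rwa [List.getD_eq_getElem dist 0 h2, List.getD_eq_getElem m 0 h1] at this
    | cons g G' =>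
      have hK1 : 1 ≤ K := by
        simp at hK
        omega
      have hrec := ih (K - 1) (by omega) (g :: G') [] (d + 1) v m dist
        (by
          simp at hK ⊢
          omega)
        (by omega) hlv hlm hld
        (by simpa using hbound)
        (by simpa using hnd)
        (fun x hx => hG x hx)
        (fun x hx => by simp at hx)
        hinv
        (fun j hj => by
          have := hm j hj
          simpa using this)
      rw [bfsB_cons gB g G' (d + 1) dist (by omega)]
      rw [← hrec]
      simp
  | cons x F' =>
    -- A pops (x, d); B processes frontier node x
    have hxb : 1 ≤ x ∧ x ≤ n := hbound x (by simp)
    set j : Nat := (x - 1).toNat with hjdef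
    have hj : j < n.toNat := by omega
    have hjm : j < m.length := by omega
    have hxj : ((j : Int)) + 1 = x := by omega
    have hxFG : x ∈ (x :: F') ++ G := by simp
    have hmx : PySem.List.pyGetD m (x - 1) 0 = -1 := by
      rw [pyGetD_getD m x hxb.1 0, ← hjdef]
      exact (hm j hj).1 (by rw [hxj]; exact hxFG)
    have hqcons : (x :: F').map (fun x => (x, d)) ++ G.map (fun x => (x, d + 1))
        = (x, d) :: (F'.map (fun x => (x, d)) ++ G.map (fun x => (x, d + 1))) := by simp
    rw [hqcons, bfsA_cons, if_pos hmx, pySetD_set m x hxb.1 d, ← hjdef]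
    -- simultaneous scan of x's neighbours
    obtain ⟨new, e1, e2, e3, e4, e5, e6, e7, e8, e9⟩ :=
      scan_sim n (gA.getD x []) (Hb x hxb.1) d hd
        (F'.map (fun x => (x, d)) ++ G.map (fun x => (x, d + 1))) G v dist hlv hld hinv
    -- x itself is never rediscovered
    have hxF : dist.getD j 0 = d := hF x (by simp)
    have hxnew : x ∉ new := by
      intro hmem
      have := (e8 x hmem).2.1
      rw [← hjdef] at this
      omega
    have hdisj : ∀ y ∈ F' ++ G, y ∉ new := by
      intro y hy hynew
      have h1 := (e8 y hynew).2.1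
      rcases List.mem_append.mp hy with hy' | hy'
      · have := hF y (by simp [hy'])
        omega
      · have := hG y hy'
        omega
    have hnd' : (F' ++ (G ++ new)).Nodup := by
      rw [← List.append_assoc]
      refine List.Nodup.append ?_ e7 ?_
      · exact (List.nodup_cons.mp (by simpa using hnd)).2
      · intro y hy hynew
        exact hdisj y hy hynew
    set D' : List Int := (innerB (d + 1) (G, dist) (gA.getD x [])).2 with hD'
    have hidx : ∀ y : Int, 1 ≤ y → (((y - 1).toNat : Int)) + 1 = y := by intro y hy; omega
    have hrec := ih (K - 1) (by
        simp only [if_neg (by simp : ¬(x :: F' = []))] at hK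
        simp only [List.length_cons] at hK
        omega) F' (G ++ new) d (scanA (gA.getD x []) (F'.map (fun x => (x, d)) ++ G.map (fun x => (x, d + 1))) v d).2 (m.set j d) D'
      (by
        have hflag : (if F' = [] then 1 else 0) ≤ 1 := by split <;> omega
        simp only [if_neg (by simp : ¬(x :: F' = []))] at hK
        simp only [List.length_cons, List.length_append] at hK ⊢
        omega)
      hd e3 (by simpa using hlm) e4
      (by
        intro y hy
        rcases List.mem_append.mp hy with hy' | hy'
        · exact hbound y (by simp [hy'])
        · rcases List.mem_append.mp hy' with hy'' | hy''
          · exact hbound y (by simp [hy''])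
          · exact (e8 y hy'').1)
      hnd'
      (by
        intro y hy
        have hyb := hbound y (by simp [hy])
        have hjy : (y - 1).toNat < n.toNat := by omega
        rw [e6 (y - 1).toNat hjy, hidx y hyb.1, if_neg (hdisj y (by simp [hy]))]
        exact hF y (by simp [hy]))
      (by
        intro y hy
        rcases List.mem_append.mp hy with hy' | hy'
        · have hyb := hbound y (by simp [hy'])
          have hjy : (y - 1).toNat < n.toNat := by omega
          rw [e6 (y - 1).toNat hjy, hidx y hyb.1, if_neg (hdisj y (by simp [hy']))]
          exact hG y hy'
        · have hyb := (e8 y hy').1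
          have hjy : (y - 1).toNat < n.toNat := by omega
          rw [e6 (y - 1).toNat hjy, hidx y hyb.1, if_pos hy'])
      (by
        intro j' hj'
        rw [e5 j' hj', e6 j' hj']
        by_cases hn' : ((j' : Int)) + 1 ∈ new
        · simp [hn']
          omega
        · simp only [if_neg hn']
          exact hinv j' hj')
      (by
        intro j' hj'
        have hndc : (x :: (F' ++ G)).Nodup := by simpa using hnd
        have hxtail : x ∉ F' ++ G := (List.nodup_cons.mp hndc).1
        have hidx' : (((j' : Int)) + 1 - 1).toNat = j' := by omega
        constructor
        · intro hpend
          have hj'j : j' ≠ j := by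
            intro hh
            rw [hh, hxj] at hpend
            rcases List.mem_append.mp hpend with hp | hp
            · exact hxtail (List.mem_append.mpr (Or.inl hp))
            · rcases List.mem_append.mp hp with hp' | hp'
              · exact hxtail (List.mem_append.mpr (Or.inr hp'))
              · exact hxnew hp'
          rw [getD_set m j hjm d j' 0, if_neg hj'j]
          rcases List.mem_append.mp hpend with hp | hp
          · exact (hm j' hj').1 (by simp [hp])
          · rcases List.mem_append.mp hp with hp' | hp'
            · exact (hm j' hj').1 (by simp [hp'])
            · have hdist : dist.getD j' 0 = -1 := by
                have := (e8 _ hp').2.1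
                rwa [hidx'] at this
              by_cases hin : ((j' : Int)) + 1 ∈ (x :: F') ++ G
              · exact (hm j' hj').1 hin
              · rw [(hm j' hj').2 hin]
                exact hdist
        · intro hpend
          by_cases hj'j : j' = j
          · rw [hj'j, getD_set m j hjm d j 0, if_pos rfl]
            have hxn : ((j : Int)) + 1 ∉ new := by rw [hxj]; exact hxnew
            rw [e6 j hj, if_neg hxn]
            exact (hF x (by simp)).symm
          · rw [getD_set m j hjm d j' 0, if_neg hj'j]
            have hnF : ((j' : Int)) + 1 ∉ (x :: F') ++ G := by
              intro hc
              rcases List.mem_cons.mp (by simpa using hc : ((j' : Int)) + 1 ∈ x :: (F' ++ G)) with h1 | h1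
              · omega
              · exact hpend (by
                  rcases List.mem_append.mp h1 with h2 | h2
                  · exact List.mem_append.mpr (Or.inl h2)
                  · exact List.mem_append.mpr (Or.inr (List.mem_append.mpr (Or.inl h2))))
            have hnnew : ((j' : Int)) + 1 ∉ new := by
              intro hc
              exact hpend (List.mem_append.mpr (Or.inr (List.mem_append.mpr (Or.inr hc))))
            rw [(hm j' hj').2 hnF, e6 j' hj', if_neg hnnew])
    have hq2 : (F'.map (fun x => (x, d)) ++ G.map (fun x => (x, d + 1)))
        ++ new.map (fun x => (x, d + 1))
        = F'.map (fun x => (x, d)) ++ (G ++ new).map (fun x => (x, d + 1)) := by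
      simp [List.append_assoc]
    have hsstep : stepB gB (d + 1) (G, dist) (x :: F')
        = stepB gB (d + 1) (innerB (d + 1) (G, dist) (PySem.List.pyGetD gB x [])) F' := by
      simp [stepB]
    have hpair : (G ++ new, D') = innerB (d + 1) (G, dist) (gA.getD x []) := by
      rw [hD']
      exact Prod.ext (by rw [e2]) rfl
    rw [e1, hq2, hrec, hsstep, ← Hg x hxb.1, ← hpair]

lemma initA_aux (n : Int) :
    ∀ (l : List Int) (st : PySem.Dict Int (List Int) × List Bool × List Int),
    (∀ u : Int, st.1.getD u [] = []) →
    (∀ u : Int,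
      (l.foldl (fun st i =>
        (st.1.insert (i + 1) ([] : List Int), st.2.1 ++ [false], st.2.2 ++ [(-1 : Int)])) st).1.getD u [] = []) ∧
    (l.foldl (fun st i =>
        (st.1.insert (i + 1) ([] : List Int), st.2.1 ++ [false], st.2.2 ++ [(-1 : Int)])) st).2.1
      = st.2.1 ++ List.replicate l.length false ∧
    (l.foldl (fun st i =>
        (st.1.insert (i + 1) ([] : List Int), st.2.1 ++ [false], st.2.2 ++ [(-1 : Int)])) st).2.2
      = st.2.2 ++ List.replicate l.length (-1) := by
  intro l
  induction l with
  | nil => intro st h; simp [h]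
  | cons i l ih =>
    intro st h
    have h' : ∀ u : Int, (st.1.insert (i + 1) ([] : List Int)).getD u [] = [] := by
      intro u
      rw [PySem.Dict.getD_insert]
      split <;> simp [h]
    obtain ⟨a1, a2, a3⟩ := ih (st.1.insert (i + 1) ([] : List Int), st.2.1 ++ [false],
      st.2.2 ++ [(-1 : Int)]) h'
    refine ⟨?_, ?_, ?_⟩
    · simp only [List.foldl_cons]
      exact a1
    · simp only [List.foldl_cons]
      rw [a2, List.append_assoc]
      congr 1
    · simp only [List.foldl_cons]
      rw [a3, List.append_assoc]
      congr 1

lemma initA_parts (n : Int) :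
    (∀ u : Int, (initA n).1.getD u [] = []) ∧
    (initA n).2.1 = List.replicate n.toNat false ∧
    (initA n).2.2 = List.replicate n.toNat (-1) := by
  have h := initA_aux n (PySem.List.pyRange 0 n 1) (PySem.Dict.empty, [], [])
    (by intro u; simp [PySem.Dict.getD_empty])
  obtain ⟨a1, a2, a3⟩ := h
  refine ⟨a1, ?_, ?_⟩
  · rw [initA, a2]; simp [PySem.List.length_pyRange_one]
  · rw [initA, a3]; simp [PySem.List.length_pyRange_one]

lemma pyGetD_all_eq {α : Type} (xs : List α) (c : α) (h : ∀ x ∈ xs, x = c) (i : Int) :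
    PySem.List.pyGetD xs i c = c := by
  simp only [PySem.List.pyGetD]
  cases hg : PySem.List.pyGet? xs i with
  | none => rfl
  | some x =>
    have := h x (PySem.List.mem_of_pyGet?_eq_some _ (i := i) hg)
    simp [this]

lemma appendAt_length (g : List (List Int)) (i w : Int) :
    (appendAt g i w).length = g.length := by
  simp [appendAt, PySem.List.length_pySetD]

lemma pyGetD_appendAt (n : Int) (g : List (List Int)) (hg : g.length = (n + 1).toNat)
    (i : Int) (hi1 : 1 ≤ i) (hi2 : i ≤ n) (w : Int) (u : Int) (hu : 1 ≤ u) :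
    PySem.List.pyGetD (appendAt g i w) u [] =
      if u = i then PySem.List.pyGetD g i [] ++ [w] else PySem.List.pyGetD g u [] := by
  have hin : i.toNat < g.length := by omega
  have hset : appendAt g i w = g.set i.toNat (PySem.List.pyGetD g i [] ++ [w]) := by
    rw [appendAt, PySem.List.pySetD_of_nonneg g _ (by omega)]
  rw [hset, PySem.List.pyGetD_of_nonneg _ _ (by omega : (0:Int) ≤ u),
      getD_set _ _ hin _ u.toNat _]
  have hiff : u.toNat = i.toNat ↔ u = i := by omega
  rw [PySem.List.pyGetD_of_nonneg g _ (by omega : (0:Int) ≤ u)]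
  split
  · rename_i hh; rw [if_pos (hiff.mp hh)]
  · rename_i hh; rw [if_neg (fun hh2 => hh (hiff.mpr hh2))]

lemma road_step (n : Int) (gA : PySem.Dict Int (List Int)) (gB : List (List Int))
    (hlen : gB.length = (n + 1).toNat)
    (hrel : ∀ u : Int, 1 ≤ u → gA.getD u [] = PySem.List.pyGetD gB u [])
    (a b : Int) (ha1 : 1 ≤ a) (ha2 : a ≤ n) (hb1 : 1 ≤ b) (hb2 : b ≤ n) (u : Int) (hu : 1 ≤ u) :
    ((gA.modify b [] (fun l => l ++ [a])).modify a [] (fun l => l ++ [b])).getD u [] =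
      PySem.List.pyGetD (appendAt (appendAt gB a b) b a) u [] := by
  have e2 := PySem.Dict.getD_modify (gA.modify b [] (fun l => l ++ [a])) a u [] (fun l => l ++ [b])
  have e1 : ∀ w : Int, (gA.modify b [] (fun l => l ++ [a])).getD w [] =
      if w = b then gA.getD b [] ++ [a] else gA.getD w [] := fun w =>
    PySem.Dict.getD_modify gA b w [] (fun l => l ++ [a])
  have f2 := pyGetD_appendAt n (appendAt gB a b) (by rw [appendAt_length]; exact hlen)
    b hb1 hb2 a u hu
  have f1 : ∀ w : Int, 1 ≤ w → PySem.List.pyGetD (appendAt gB a b) w [] =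
      if w = a then PySem.List.pyGetD gB a [] ++ [b] else PySem.List.pyGetD gB w [] :=
    fun w hw => pyGetD_appendAt n gB hlen a ha1 ha2 b w hw
  rw [e2, e1, e1, f2, f1 u hu, f1 b hb1]
  by_cases hua : u = a
  · subst hua
    by_cases hab : u = b
    · subst hab
      simp [hrel u hu]
    · simp [hab, hrel u hu]
  · by_cases hub : u = b
    · subst hub
      simp [hua, hrel u hu]
    · simp [hua, hub, hrel u hu]

lemma road_step_bnd (n : Int) (gA : PySem.Dict Int (List Int))
    (hbnd : ∀ u : Int, 1 ≤ u → ∀ x ∈ gA.getD u [], 1 ≤ x ∧ x ≤ n)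
    (a b : Int) (ha1 : 1 ≤ a) (ha2 : a ≤ n) (hb1 : 1 ≤ b) (hb2 : b ≤ n) (u : Int) (hu : 1 ≤ u) :
    ∀ x ∈ ((gA.modify b [] (fun l => l ++ [a])).modify a [] (fun l => l ++ [b])).getD u [],
      1 ≤ x ∧ x ≤ n := by
  intro x hx
  rw [PySem.Dict.getD_modify] at hx
  have e1 : ∀ w : Int, (gA.modify b [] (fun l => l ++ [a])).getD w [] =
      if w = b then gA.getD b [] ++ [a] else gA.getD w [] := fun w =>
    PySem.Dict.getD_modify gA b w [] (fun l => l ++ [a])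
  rw [e1, e1] at hx
  split at hx
  · rcases List.mem_append.mp hx with hx | hx
    · split at hx
      · rcases List.mem_append.mp hx with hx | hx
        · exact hbnd b hb1 x hx
        · simp at hx; subst hx; exact ⟨ha1, ha2⟩
      · exact hbnd a ha1 x hx
    · simp at hx; subst hx; exact ⟨hb1, hb2⟩
  · split at hx
    · rcases List.mem_append.mp hx with hx | hx
      · exact hbnd b hb1 x hx
      · simp at hx; subst hx; exact ⟨ha1, ha2⟩
    · exact hbnd u hu x hx

lemma graphs_rel_aux (n : Int) :
    ∀ (roads : List (List Int)) (gA : PySem.Dict Int (List Int)) (gB : List (List Int)),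
    (∀ r ∈ roads, 2 ≤ r.length ∧ ∀ x ∈ r.take 2, 1 ≤ x ∧ x ≤ n) →
    gB.length = (n + 1).toNat →
    (∀ u : Int, 1 ≤ u → gA.getD u [] = PySem.List.pyGetD gB u []) →
    (∀ u : Int, 1 ≤ u → ∀ x ∈ gA.getD u [], 1 ≤ x ∧ x ≤ n) →
    (∀ u : Int, 1 ≤ u →
      (roads.foldl (fun g road =>
        (PySem.List.pyRange 0 2 1).foldl
          (fun g i =>
            g.modify (PySem.List.pyGetD road (1 - i) 0) []
              (fun l => l ++ [PySem.List.pyGetD road i 0])) g) gA).getD u []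
        = PySem.List.pyGetD (roads.foldl (fun g road =>
            appendAt (appendAt g (PySem.List.pyGetD road 0 0) (PySem.List.pyGetD road 1 0))
              (PySem.List.pyGetD road 1 0) (PySem.List.pyGetD road 0 0)) gB) u []) ∧
    (∀ u : Int, 1 ≤ u → ∀ x ∈ (roads.foldl (fun g road =>
        (PySem.List.pyRange 0 2 1).foldl
          (fun g i =>
            g.modify (PySem.List.pyGetD road (1 - i) 0) []
              (fun l => l ++ [PySem.List.pyGetD road i 0])) g) gA).getD u [], 1 ≤ x ∧ x ≤ n) := by
  intro roads
  induction roads with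
  | nil =>
    intro gA gB _ _ hrel hbnd
    exact ⟨fun u hu => hrel u hu, fun u hu => hbnd u hu⟩
  | cons r rs ih =>
    intro gA gB hroads hlen hrel hbnd
    obtain ⟨hr2, hrb⟩ := hroads r (by simp)
    match r, hr2 with
    | a :: b :: rest, _ =>
      have ha : 1 ≤ a ∧ a ≤ n := hrb a (by simp)
      have hb : 1 ≤ b ∧ b ≤ n := hrb b (by simp [List.take])
      have hget0 : PySem.List.pyGetD (a :: b :: rest) 0 0 = a := by simp [pysem]
      have hget1 : PySem.List.pyGetD (a :: b :: rest) 1 0 = b := by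
        simp [PySem.List.pyGetD, PySem.List.pyGet?, PySem.List.pyIdx?]
      have hstepA : (PySem.List.pyRange 0 2 1).foldl
          (fun g i =>
            g.modify (PySem.List.pyGetD (a :: b :: rest) (1 - i) 0) []
              (fun l => l ++ [PySem.List.pyGetD (a :: b :: rest) i 0])) gA
          = (gA.modify b [] (fun l => l ++ [a])).modify a [] (fun l => l ++ [b]) := by
        rw [show PySem.List.pyRange 0 2 1 = [0, 1] by decide]
        simp only [List.foldl_cons, List.foldl_nil]
        norm_num [hget0, hget1]
      simp only [List.foldl_cons, hstepA, hget0, hget1]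
      exact ih ((gA.modify b [] (fun l => l ++ [a])).modify a [] (fun l => l ++ [b]))
        (appendAt (appendAt gB a b) b a)
        (fun r' hr' => hroads r' (by simp [hr']))
        (by rw [appendAt_length, appendAt_length]; exact hlen)
        (fun u hu => road_step n gA gB hlen hrel a b ha.1 ha.2 hb.1 hb.2 u hu)
        (fun u hu => road_step_bnd n gA hbnd a b ha.1 ha.2 hb.1 hb.2 u hu)

lemma graphs_rel (n : Int) (roads : List (List Int))
    (hroads : ∀ r ∈ roads, 2 ≤ r.length ∧ ∀ x ∈ r.take 2, 1 ≤ x ∧ x ≤ n) :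
    (∀ u : Int, 1 ≤ u → (graphA n roads).getD u [] = PySem.List.pyGetD (graphB n roads) u []) ∧
    (∀ u : Int, 1 ≤ u → ∀ x ∈ (graphA n roads).getD u [], 1 ≤ x ∧ x ≤ n) := by
  have hlen : ((PySem.List.pyRange 0 (n + 1) 1).map
      (fun _ => ([] : List Int))).length = (n + 1).toNat := by
    simp [PySem.List.length_pyRange_one]
  have hrel : ∀ u : Int, 1 ≤ u → (initA n).1.getD u [] =
      PySem.List.pyGetD ((PySem.List.pyRange 0 (n + 1) 1).map (fun _ => ([] : List Int))) u [] := by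
    intro u _
    rw [(initA_parts n).1 u, pyGetD_all_eq]
    intro x hx
    simp only [List.mem_map] at hx
    obtain ⟨_, _, hx⟩ := hx
    exact hx.symm
  have hbnd : ∀ u : Int, 1 ≤ u → ∀ x ∈ (initA n).1.getD u [], 1 ≤ x ∧ x ≤ n := by
    intro u _ x hx
    rw [(initA_parts n).1 u] at hx
    simp at hx
  exact graphs_rel_aux n roads (initA n).1 _ hroads hlen hrel hbnd

lemma answer_map (M : List Int) (sources : List Int) :
    (PySem.List.pyRange 0 (PySem.List.len sources) 1).foldl
      (fun acc i => acc ++ [PySem.List.pyGetD M (PySem.List.pyGetD sources i 0 - 1) 0])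
      ([] : List Int)
    = sources.map (fun s => PySem.List.pyGetD M (s - 1) 0) := by
  rw [PySem.List.foldl_pyRange_zero_pyGetD sources 0
    (fun acc s => acc ++ [PySem.List.pyGetD M (s - 1) 0]) []]
  simpa using PySem.List.foldl_append_singleton_eq_map
    (fun s => PySem.List.pyGetD M (s - 1) 0) sources []

-- A equals the intermediate level-synchronised BFS
lemma A_eq_level (n : Int) (roads : List (List Int)) (sources : List Int) (destination : Int)
    (hPre : Pre_solution n roads sources destination) :
    solution n roads sources destination =
      sources.map (fun s => PySem.List.pyGetD
        (bfsB (graphB n roads) [destination] 0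
          ((List.replicate n.toNat (-1)).set (destination - 1).toNat 0)) (s - 1) 0) := by
  obtain ⟨hd1, hd2, hroads, hsrc⟩ := hPre
  obtain ⟨hgrel, hgbnd⟩ := graphs_rel n roads hroads
  obtain ⟨hi1, hi2, hi3⟩ := initA_parts n
  have hj0n : (destination - 1).toNat < n.toNat := by omega
  have hjv0 : (destination - 1).toNat < (List.replicate n.toNat false).length := by
    simp; omega
  have hjd0 : (destination - 1).toNat < (List.replicate n.toNat (-1 : Int)).length := by
    simp; omega
  have hmain := bridge (graphA n roads) (graphB n roads) n hgrel hgbnd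
    (2 * (2 * ((List.replicate n.toNat false).set (destination - 1).toNat true).count false
      + 1 + 0) + 0)
    [destination] [] 0
    ((List.replicate n.toNat false).set (destination - 1).toNat true)
    (List.replicate n.toNat (-1 : Int))
    ((List.replicate n.toNat (-1 : Int)).set (destination - 1).toNat 0)
    (by simp)
    (by omega)
    (by simp) (by simp) (by simp)
    (by intro y hy; simp at hy; subst hy; exact ⟨hd1, hd2⟩)
    (by simp)
    (by
      intro y hy
      simp at hy
      subst hy
      rw [getD_set _ _ hjd0 0 _ 0, if_pos rfl])
    (by simp)
    (by
      intro j hj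
      rw [getD_set _ _ hjv0 true j false, getD_set _ _ hjd0 0 j 0]
      by_cases hjj : j = (destination - 1).toNat
      · simp [hjj]
      · simp only [if_neg hjj]
        rw [List.getD_replicate _ (by omega), List.getD_replicate _ (by omega)]
        simp)
    (by
      intro j hj
      constructor
      · intro _
        rw [List.getD_replicate _ (by omega)]
      · intro hnp
        have hjj : j ≠ (destination - 1).toNat := by
          intro hh
          exact hnp (by simp; omega)
        rw [List.getD_replicate _ (by omega), getD_set _ _ hjd0 0 j 0, if_neg hjj,
          List.getD_replicate _ (by omega)])
  have hfinal : bfsA (graphA n roads) [(destination, 0)]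
        ((List.replicate n.toNat false).set (destination - 1).toNat true)
        (List.replicate n.toNat (-1 : Int))
      = bfsB (graphB n roads) [destination] 0
        ((List.replicate n.toNat (-1 : Int)).set (destination - 1).toNat 0) := by
    rw [bfsB_cons (graphB n roads) destination [] 0 _ (by omega)]
    have hq : ([destination].map (fun x => (x, (0 : Int))) ++
        ([] : List Int).map (fun x => (x, (0 : Int) + 1))) = [(destination, 0)] := by simp
    rw [← hq]
    exact hmain
  simp only [solution]
  rw [hi3, hi2, pySetD_set _ destination hd1 true, hfinal, answer_map]

-- ---- stage 2: the level BFS equals B's fixed-point sweeps ----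

-- the condition B's sweep tests for vertex j+1 (pull: some neighbour is labelled d)
abbrev relCond (gB : List (List Int)) (d : Int) (dist0 : List Int) (j : Nat) : Prop :=
  dist0.getD j 0 = -1 ∧
    ∃ x ∈ PySem.List.pyGetD gB ((j : Int) + 1) [], dist0.getD (x - 1).toNat 0 = d

lemma list_eq_of_getD (xs ys : List Int) (h : xs.length = ys.length)
    (hp : ∀ j : Nat, j < ys.length → xs.getD j 0 = ys.getD j 0) : xs = ys := by
  apply List.ext_getElem h
  intro j h1 h2
  have := hp j h2
  rwa [List.getD_eq_getElem xs 0 h1, List.getD_eq_getElem ys 0 h2] at this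

lemma count_pointwise (c : Int) (hc : c ≠ -1) :
    ∀ (xs ys : List Int), xs.length = ys.length →
    (∀ j : Nat, j < xs.length → ys.getD j 0 = xs.getD j 0 ∨
        (xs.getD j 0 = -1 ∧ ys.getD j 0 = c)) →
    ys.count (-1) ≤ xs.count (-1) ∧
      ((∃ j : Nat, j < xs.length ∧ xs.getD j 0 ≠ ys.getD j 0) →
        ys.count (-1) < xs.count (-1)) := by
  intro xs
  induction xs with
  | nil =>
    intro ys hlen hp
    have : ys = [] := List.eq_nil_of_length_eq_zero (by simpa using hlen.symm)
    subst this
    refine ⟨le_rfl, ?_⟩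
    rintro ⟨j, hj, _⟩
    simp at hj
  | cons x xs ih =>
    intro ys hlen hp
    cases ys with
    | nil => simp at hlen
    | cons y ys =>
      have h0 := hp 0 (by simp)
      simp only [List.getD_cons_zero] at h0
      have htail : ∀ j : Nat, j < xs.length → ys.getD j 0 = xs.getD j 0 ∨
          (xs.getD j 0 = -1 ∧ ys.getD j 0 = c) := by
        intro j hj
        have := hp (j + 1) (by simp; omega)
        simpa using this
      obtain ⟨hle, hlt⟩ := ih ys (by simpa using hlen) htail
      simp only [List.count_cons, beq_iff_eq]
      rcases h0 with h0 | ⟨h1, h2⟩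
      · constructor
        · rw [h0]; omega
        · rintro ⟨j, hj, hne⟩
          cases j with
          | zero =>
            simp only [List.getD_cons_zero] at hne
            exact absurd h0.symm hne
          | succ k =>
            have hk : k < xs.length := by simp at hj; omega
            have := hlt ⟨k, hk, by simpa using hne⟩
            rw [h0]
            omega
      · constructor
        · rw [h1, h2]
          simp [hc]
          omega
        · intro _
          rw [h1, h2]
          simp [hc]
          omega

lemma innerB_char (n L : Int) (hL : L ≠ -1) :
    ∀ (nb : List Int), (∀ x ∈ nb, 1 ≤ x ∧ x ≤ n) →
    ∀ (G dist : List Int), dist.length = n.toNat →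
    (innerB L (G, dist) nb).2.length = n.toNat ∧
    (∀ j : Nat, j < n.toNat → (innerB L (G, dist) nb).2.getD j 0 =
      if dist.getD j 0 = -1 ∧ ((j : Int) + 1) ∈ nb then L else dist.getD j 0) ∧
    (∀ y : Int, y ∈ (innerB L (G, dist) nb).1 ↔
      y ∈ G ∨ (1 ≤ y ∧ y ≤ n ∧ dist.getD (y - 1).toNat 0 = -1 ∧ y ∈ nb)) := by
  intro nb
  induction nb with
  | nil =>
    intro _ G dist hN
    refine ⟨by simpa [innerB] using hN, ?_, ?_⟩
    · intro j hj; simp [innerB]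
    · intro y; simp [innerB]
  | cons x nb ih =>
    intro hb G dist hN
    have hx1 : 1 ≤ x := (hb x (by simp)).1
    have hx2 : x ≤ n := (hb x (by simp)).2
    have hb' : ∀ y ∈ nb, 1 ≤ y ∧ y ≤ n := fun y hy => hb y (by simp [hy])
    have hcond : PySem.List.pyGetD dist (x - 1) 0 = dist.getD (x - 1).toNat 0 :=
      pyGetD_getD dist x hx1 0
    have hjx : (x - 1).toNat < dist.length := by omega
    by_cases hvis : dist.getD (x - 1).toNat 0 = -1
    · have hstep : innerB L (G, dist) (x :: nb)
          = innerB L (G ++ [x], dist.set (x - 1).toNat L) nb := by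
        rw [innerB_cons, if_pos (by rw [hcond]; exact hvis)]
        simp only [pySetD_set dist x hx1 L]
      obtain ⟨l1, l2, l3⟩ := ih hb' (G ++ [x]) (dist.set (x - 1).toNat L) (by simpa using hN)
      rw [hstep]
      refine ⟨l1, ?_, ?_⟩
      · intro j hj
        by_cases hjj : j = (x - 1).toNat
        · have h1 : dist.getD j 0 = -1 := by rw [hjj]; exact hvis
          have hmem : ((j : Int) + 1) ∈ x :: nb := by
            have : ((j : Int)) + 1 = x := by omega
            simp [this]
          have hset : (dist.set (x - 1).toNat L).getD j 0 = L := by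
            rw [getD_set dist (x - 1).toNat hjx L j 0, if_pos hjj]
          rw [l2 j hj, hset, if_neg (fun h => hL h.1), if_pos ⟨h1, hmem⟩]
        · have hne : ((j : Int)) + 1 ≠ x := by omega
          have hset : (dist.set (x - 1).toNat L).getD j 0 = dist.getD j 0 := by
            rw [getD_set dist (x - 1).toNat hjx L j 0, if_neg hjj]
          rw [l2 j hj, hset]
          exact if_congr (by simp [List.mem_cons, hne]) rfl rfl
      · intro y
        rw [l3 y]
        constructor
        · rintro (hG | ⟨h1, h2, h3, h4⟩)
          · rcases List.mem_append.mp hG with hG | hG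
            · exact Or.inl hG
            · simp at hG
              subst hG
              exact Or.inr ⟨hx1, hx2, hvis, by simp⟩
          · rw [getD_set dist (x - 1).toNat hjx L (y - 1).toNat 0] at h3
            by_cases hyx : (y - 1).toNat = (x - 1).toNat
            · rw [if_pos hyx] at h3
              exact absurd h3 hL
            · rw [if_neg hyx] at h3
              exact Or.inr ⟨h1, h2, h3, by simp [h4]⟩
        · rintro (hG | ⟨h1, h2, h3, h4⟩)
          · exact Or.inl (List.mem_append.mpr (Or.inl hG))
          · by_cases hyx : y = x
            · exact Or.inl (List.mem_append.mpr (Or.inr (by simp [hyx])))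
            · right
              refine ⟨h1, h2, ?_, ?_⟩
              · rw [getD_set dist (x - 1).toNat hjx L (y - 1).toNat 0,
                  if_neg (by omega)]
                exact h3
              · rcases List.mem_cons.mp h4 with h | h
                · exact absurd h hyx
                · exact h
    · have hstep : innerB L (G, dist) (x :: nb) = innerB L (G, dist) nb := by
        rw [innerB_cons, if_neg (by rw [hcond]; exact hvis)]
      obtain ⟨l1, l2, l3⟩ := ih hb' G dist hN
      rw [hstep]
      refine ⟨l1, ?_, ?_⟩
      · intro j hj
        rw [l2 j hj]
        by_cases hjj : j = (x - 1).toNat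
        · have h1 : ¬(dist.getD j 0 = -1) := by rw [hjj]; exact hvis
          rw [if_neg (fun h => h1 h.1), if_neg (fun h => h1 h.1)]
        · have hne : ((j : Int)) + 1 ≠ x := by omega
          exact if_congr (by simp [List.mem_cons, hne]) rfl rfl
      · intro y
        rw [l3 y]
        constructor
        · rintro (h | ⟨a1, a2, a3, a4⟩)
          · exact Or.inl h
          · exact Or.inr ⟨a1, a2, a3, by simp [a4]⟩
        · rintro (h | ⟨a1, a2, a3, a4⟩)
          · exact Or.inl h
          · right
            refine ⟨a1, a2, a3, ?_⟩
            rcases List.mem_cons.mp a4 with h | h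
            · subst h
              exact absurd a3 hvis
            · exact h

lemma stepB_char (gB : List (List Int)) (n L : Int) (hL : L ≠ -1)
    (hbnd : ∀ u : Int, 1 ≤ u → ∀ x ∈ PySem.List.pyGetD gB u [], 1 ≤ x ∧ x ≤ n) :
    ∀ (F : List Int), (∀ u ∈ F, 1 ≤ u ∧ u ≤ n) →
    ∀ (G dist : List Int), dist.length = n.toNat →
    (stepB gB L (G, dist) F).2.length = n.toNat ∧
    (∀ j : Nat, j < n.toNat → (stepB gB L (G, dist) F).2.getD j 0 =
      if dist.getD j 0 = -1 ∧ ∃ u ∈ F, ((j : Int) + 1) ∈ PySem.List.pyGetD gB u [] then L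
      else dist.getD j 0) ∧
    (∀ y : Int, y ∈ (stepB gB L (G, dist) F).1 ↔
      y ∈ G ∨ (1 ≤ y ∧ y ≤ n ∧ dist.getD (y - 1).toNat 0 = -1 ∧
        ∃ u ∈ F, y ∈ PySem.List.pyGetD gB u [])) := by
  intro F
  induction F with
  | nil =>
    intro _ G dist hN
    refine ⟨by simpa [stepB] using hN, ?_, ?_⟩
    · intro j hj
      rw [if_neg (by rintro ⟨_, u, hu, _⟩; simp at hu)]
      simp [stepB]
    · intro y
      simp [stepB]
  | cons u F ih =>
    intro hF G dist hN
    have hu : 1 ≤ u ∧ u ≤ n := hF u (by simp)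
    have hF' : ∀ v ∈ F, 1 ≤ v ∧ v ≤ n := fun v hv => hF v (by simp [hv])
    have hstep : stepB gB L (G, dist) (u :: F)
        = stepB gB L (innerB L (G, dist) (PySem.List.pyGetD gB u [])) F := by
      simp [stepB]
    obtain ⟨i1, i2, i3⟩ := innerB_char n L hL (PySem.List.pyGetD gB u [])
      (hbnd u hu.1) G dist hN
    obtain ⟨m1, m2, m3⟩ := ih hF'
      (innerB L (G, dist) (PySem.List.pyGetD gB u [])).1
      (innerB L (G, dist) (PySem.List.pyGetD gB u [])).2 i1
    rw [Prod.mk.eta] at m1 m2 m3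
    rw [hstep]
    refine ⟨m1, ?_, ?_⟩
    · intro j hj
      rw [m2 j hj, i2 j hj]
      by_cases h1 : dist.getD j 0 = -1
      · by_cases h2 : ((j : Int) + 1) ∈ PySem.List.pyGetD gB u []
        · have hi : (if dist.getD j 0 = -1 ∧ ((j : Int) + 1) ∈ PySem.List.pyGetD gB u []
              then L else dist.getD j 0) = L := if_pos ⟨h1, h2⟩
          rw [hi, if_neg (fun h => hL h.1),
            if_pos (⟨h1, u, by simp, h2⟩ :
              dist.getD j 0 = -1 ∧ ∃ w ∈ u :: F, ((j : Int) + 1) ∈ PySem.List.pyGetD gB w [])]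
        · have hi : (if dist.getD j 0 = -1 ∧ ((j : Int) + 1) ∈ PySem.List.pyGetD gB u []
              then L else dist.getD j 0) = dist.getD j 0 := if_neg (fun h => h2 h.2)
          rw [hi]
          by_cases h3 : ∃ v ∈ F, ((j : Int) + 1) ∈ PySem.List.pyGetD gB v []
          · obtain ⟨v, hv, hm⟩ := h3
            rw [if_pos (⟨h1, v, hv, hm⟩ :
                dist.getD j 0 = -1 ∧ ∃ w ∈ F, ((j : Int) + 1) ∈ PySem.List.pyGetD gB w []),
              if_pos (⟨h1, v, by simp [hv], hm⟩ :
                dist.getD j 0 = -1 ∧ ∃ w ∈ u :: F, ((j : Int) + 1) ∈ PySem.List.pyGetD gB w [])]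
          · rw [if_neg (fun h => h3 h.2), if_neg ?_]
            rintro ⟨_, w, hw, hm⟩
            rcases List.mem_cons.mp hw with hwu | hwF
            · exact h2 (hwu ▸ hm)
            · exact h3 ⟨w, hwF, hm⟩
      · have hi : (if dist.getD j 0 = -1 ∧ ((j : Int) + 1) ∈ PySem.List.pyGetD gB u []
            then L else dist.getD j 0) = dist.getD j 0 := if_neg (fun h => h1 h.1)
        rw [hi, if_neg (fun h => h1 h.1), if_neg (fun h => h1 h.1)]
    · intro y
      rw [m3 y, i3 y]
      constructor
      · rintro ((hG | ⟨b1, b2, b3, b4⟩) | ⟨c1, c2, c3, c4⟩)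
        · exact Or.inl hG
        · exact Or.inr ⟨b1, b2, b3, u, by simp, b4⟩
        · right
          have hjy : (y - 1).toNat < n.toNat := by omega
          have hcast : (((y - 1).toNat : Int)) + 1 = y := by omega
          rw [i2 (y - 1).toNat hjy, hcast] at c3
          obtain ⟨w, hw, hm⟩ := c4
          by_cases hin : dist.getD (y - 1).toNat 0 = -1 ∧ y ∈ PySem.List.pyGetD gB u []
          · rw [if_pos hin] at c3
            exact absurd c3 hL
          · rw [if_neg hin] at c3
            exact ⟨c1, c2, c3, w, by simp [hw], hm⟩
      · rintro (hG | ⟨b1, b2, b3, w, hw, hm⟩)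
        · exact Or.inl (Or.inl hG)
        · have hjy : (y - 1).toNat < n.toNat := by omega
          have hcast : (((y - 1).toNat : Int)) + 1 = y := by omega
          rcases List.mem_cons.mp hw with hwu | hwF
          · exact Or.inl (Or.inr ⟨b1, b2, b3, hwu ▸ hm⟩)
          · by_cases hadj : y ∈ PySem.List.pyGetD gB u []
            · exact Or.inl (Or.inr ⟨b1, b2, b3, hadj⟩)
            · right
              refine ⟨b1, b2, ?_, w, hwF, hm⟩
              rw [i2 (y - 1).toNat hjy, hcast, if_neg (fun h => hadj h.2)]
              exact b3

lemma sweepGo (gB : List (List Int)) (n d : Int) (hd : 0 ≤ d)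
    (hbnd : ∀ u : Int, 1 ≤ u → ∀ x ∈ PySem.List.pyGetD gB u [], 1 ≤ x ∧ x ≤ n)
    (dist0 : List Int) :
    ∀ (us : List Int), us.Nodup → (∀ u ∈ us, 1 ≤ u ∧ u ≤ n) →
    ∀ (cur : List Int) (ch : Bool), cur.length = n.toNat →
    (∀ j : Nat, j < n.toNat → cur.getD j 0 = dist0.getD j 0 ∨
        (dist0.getD j 0 = -1 ∧ cur.getD j 0 = d + 1 ∧ ((j : Int) + 1) ∉ us)) →
    (us.foldl (sweepStep gB d) (cur, ch)).1.length = n.toNat ∧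
    (∀ j : Nat, j < n.toNat → (us.foldl (sweepStep gB d) (cur, ch)).1.getD j 0 =
      if ((j : Int) + 1) ∈ us ∧ relCond gB d dist0 j then d + 1 else cur.getD j 0) := by
  intro us
  induction us with
  | nil =>
    intro _ _ cur ch hlen hinv
    refine ⟨by simpa using hlen, ?_⟩
    intro j hj
    rw [if_neg (by rintro ⟨hm, _⟩; simp at hm)]
    simp
  | cons u us ihu =>
    intro hnd hbs cur ch hlen hinv
    have hu1 : 1 ≤ u := (hbs u (by simp)).1
    have hu2 : u ≤ n := (hbs u (by simp)).2
    have hnd' : us.Nodup := (List.nodup_cons.mp hnd).2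
    have hus : u ∉ us := (List.nodup_cons.mp hnd).1
    have hbs' : ∀ v ∈ us, 1 ≤ v ∧ v ≤ n := fun v hv => hbs v (by simp [hv])
    have hju : (u - 1).toNat < n.toNat := by omega
    have hjulen : (u - 1).toNat < cur.length := by omega
    have hucast : (((u - 1).toNat : Int)) + 1 = u := by omega
    -- u's own cell is untouched so far (it has not been scanned yet)
    have hcur_u : cur.getD (u - 1).toNat 0 = dist0.getD (u - 1).toNat 0 := by
      rcases hinv (u - 1).toNat hju with h | ⟨_, _, hnm⟩
      · exact h
      · exact absurd (by rw [hucast]; simp) hnm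
    -- the any-check over the evolving array equals the check over dist0 (d ≥ 0, writes are d+1)
    have hany : ((PySem.List.pyGetD gB u []).any
        (fun x => PySem.List.pyGetD cur (x - 1) 0 == d) = true)
        ↔ ∃ x ∈ PySem.List.pyGetD gB u [], dist0.getD (x - 1).toNat 0 = d := by
      rw [List.any_eq_true]
      constructor
      · rintro ⟨x, hx, hpx⟩
        have hxb := hbnd u hu1 x hx
        have hjx : (x - 1).toNat < n.toNat := by omega
        rw [pyGetD_getD cur x hxb.1 0] at hpx
        have hval : cur.getD (x - 1).toNat 0 = d := beq_iff_eq.mp hpx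
        rcases hinv (x - 1).toNat hjx with h | ⟨h1, h2, _⟩
        · exact ⟨x, hx, by rw [← h]; exact hval⟩
        · rw [h2] at hval
          omega
      · rintro ⟨x, hx, hval⟩
        have hxb := hbnd u hu1 x hx
        have hjx : (x - 1).toNat < n.toNat := by omega
        refine ⟨x, hx, ?_⟩
        rw [pyGetD_getD cur x hxb.1 0]
        rcases hinv (x - 1).toNat hjx with h | ⟨h1, h2, _⟩
        · rw [h, hval]
          exact beq_self_eq_true d
        · rw [hval] at h1
          omega
    simp only [List.foldl_cons]
    by_cases hc : PySem.List.pyGetD cur (u - 1) 0 = -1 ∧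
        (PySem.List.pyGetD gB u []).any (fun x => PySem.List.pyGetD cur (x - 1) 0 == d) = true
    · have hstep : sweepStep gB d (cur, ch) u = (cur.set (u - 1).toNat (d + 1), true) := by
        simp only [sweepStep]
        rw [if_pos hc, pySetD_set cur u hu1 (d + 1)]
      have hc1 : cur.getD (u - 1).toNat 0 = -1 := by
        have := hc.1
        rwa [pyGetD_getD cur u hu1 0] at this
      have hd0u : dist0.getD (u - 1).toNat 0 = -1 := by rw [← hcur_u]; exact hc1
      have hRC : relCond gB d dist0 (u - 1).toNat :=
        ⟨hd0u, by rw [hucast]; exact hany.mp hc.2⟩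
      have hinv' : ∀ j : Nat, j < n.toNat →
          (cur.set (u - 1).toNat (d + 1)).getD j 0 = dist0.getD j 0 ∨
            (dist0.getD j 0 = -1 ∧ (cur.set (u - 1).toNat (d + 1)).getD j 0 = d + 1 ∧
              ((j : Int) + 1) ∉ us) := by
        intro j hj
        rw [getD_set cur (u - 1).toNat hjulen (d + 1) j 0]
        by_cases hjj : j = (u - 1).toNat
        · right
          refine ⟨by rw [hjj]; exact hd0u, by rw [if_pos hjj], ?_⟩
          rw [hjj, hucast]
          exact hus
        · rw [if_neg hjj]
          rcases hinv j hj with h | ⟨a, b, c2⟩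
          · exact Or.inl h
          · exact Or.inr ⟨a, b, fun hm => c2 (by simp [hm])⟩
      obtain ⟨g1, g2⟩ := ihu hnd' hbs' (cur.set (u - 1).toNat (d + 1)) true
        (by simpa using hlen) hinv'
      rw [hstep]
      refine ⟨g1, ?_⟩
      intro j hj
      rw [g2 j hj]
      by_cases hjj : j = (u - 1).toNat
      · have hnus : ((j : Int) + 1) ∉ us := by rw [hjj, hucast]; exact hus
        have hsetj : (cur.set (u - 1).toNat (d + 1)).getD j 0 = d + 1 := by
          rw [getD_set cur (u - 1).toNat hjulen (d + 1) j 0, if_pos hjj]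
        rw [if_neg (fun h => hnus h.1), hsetj,
          if_pos ⟨by rw [hjj, hucast]; simp, by rw [hjj]; exact hRC⟩]
      · have hsetj : (cur.set (u - 1).toNat (d + 1)).getD j 0 = cur.getD j 0 := by
          rw [getD_set cur (u - 1).toNat hjulen (d + 1) j 0, if_neg hjj]
        rw [hsetj]
        have hne : ((j : Int) + 1) ≠ u := by omega
        exact if_congr (by simp [List.mem_cons, hne]) rfl rfl
    · have hstep : sweepStep gB d (cur, ch) u = (cur, ch) := by
        simp only [sweepStep]
        rw [if_neg hc]
      have hnRC : ¬ relCond gB d dist0 (u - 1).toNat := by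
        rintro ⟨ha, hb⟩
        apply hc
        constructor
        · rw [pyGetD_getD cur u hu1 0, hcur_u]
          exact ha
        · apply hany.mpr
          rw [hucast] at hb
          exact hb
      have hinv' : ∀ j : Nat, j < n.toNat →
          cur.getD j 0 = dist0.getD j 0 ∨
            (dist0.getD j 0 = -1 ∧ cur.getD j 0 = d + 1 ∧ ((j : Int) + 1) ∉ us) := by
        intro j hj
        rcases hinv j hj with h | ⟨a, b, c2⟩
        · exact Or.inl h
        · exact Or.inr ⟨a, b, fun hm => c2 (by simp [hm])⟩
      obtain ⟨g1, g2⟩ := ihu hnd' hbs' cur ch hlen hinv'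
      rw [hstep]
      refine ⟨g1, ?_⟩
      intro j hj
      rw [g2 j hj]
      by_cases hjj : j = (u - 1).toNat
      · have hnr : ¬ relCond gB d dist0 j := by rw [hjj]; exact hnRC
        rw [if_neg (fun h => hnr h.2), if_neg (fun h => hnr h.2)]
      · have hne : ((j : Int) + 1) ≠ u := by omega
        exact if_congr (by simp [List.mem_cons, hne]) rfl rfl

lemma sweepRound_char (gB : List (List Int)) (n d : Int) (hd : 0 ≤ d)
    (hbnd : ∀ u : Int, 1 ≤ u → ∀ x ∈ PySem.List.pyGetD gB u [], 1 ≤ x ∧ x ≤ n)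
    (dist0 : List Int) (hN : dist0.length = n.toNat) :
    (sweepRound gB n d dist0).1.length = n.toNat ∧
    (∀ j : Nat, j < n.toNat → (sweepRound gB n d dist0).1.getD j 0 =
      if relCond gB d dist0 j then d + 1 else dist0.getD j 0) := by
  have hnd : (PySem.List.pyRange 1 (n + 1) 1).Nodup := (PySem.List.nodup_pyRange_one 1 (n + 1))
  have hbs : ∀ u ∈ PySem.List.pyRange 1 (n + 1) 1, 1 ≤ u ∧ u ≤ n := by
    intro u hu
    rw [PySem.List.mem_pyRange_one] at hu
    omega
  obtain ⟨g1, g2⟩ := sweepGo gB n d hd hbnd dist0 (PySem.List.pyRange 1 (n + 1) 1) hnd hbs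
    dist0 false hN (fun j hj => Or.inl rfl)
  constructor
  · simpa only [sweepRound] using g1
  · intro j hj
    have hmem : ((j : Int) + 1) ∈ PySem.List.pyRange 1 (n + 1) 1 := by
      rw [PySem.List.mem_pyRange_one]
      omega
    have := g2 j hj
    simp only [sweepRound]
    rw [this]
    by_cases hr : relCond gB d dist0 j
    · rw [if_pos ⟨hmem, hr⟩, if_pos hr]
    · rw [if_neg (fun h => hr h.2), if_neg hr]

-- the count of -1 drops whenever a sweep at d ≥ 0 relabels some vertex
lemma round_progress (gB : List (List Int)) (n d : Int) (hd : 0 ≤ d)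
    (hbnd : ∀ u : Int, 1 ≤ u → ∀ x ∈ PySem.List.pyGetD gB u [], 1 ≤ x ∧ x ≤ n)
    (dist0 : List Int) (hN : dist0.length = n.toNat)
    (hex : ∃ j : Nat, j < n.toNat ∧ relCond gB d dist0 j) :
    (sweepRound gB n d dist0).1.count (-1) < dist0.count (-1) := by
  obtain ⟨r1, r2⟩ := sweepRound_char gB n d hd hbnd dist0 hN
  obtain ⟨j0, hj0, hrc⟩ := hex
  have hpoint : ∀ j : Nat, j < dist0.length →
      (sweepRound gB n d dist0).1.getD j 0 = dist0.getD j 0 ∨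
        (dist0.getD j 0 = -1 ∧ (sweepRound gB n d dist0).1.getD j 0 = d + 1) := by
    intro j hj
    rw [r2 j (by omega)]
    by_cases hr : relCond gB d dist0 j
    · rw [if_pos hr]
      exact Or.inr ⟨hr.1, rfl⟩
    · rw [if_neg hr]
      exact Or.inl rfl
  have hcp := count_pointwise (d + 1) (by omega) dist0 (sweepRound gB n d dist0).1
    (by rw [r1, hN]) hpoint
  apply hcp.2
  refine ⟨j0, by omega, ?_⟩
  rw [r2 j0 hj0, if_pos hrc, hrc.1]
  omega

lemma sweepLoop_eq (gB : List (List Int)) (n d : Int) (dist : List Int) :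
    sweepLoop gB n d dist =
      if (sweepRound gB n d dist).1.count (-1) < dist.count (-1) then
        sweepLoop gB n (d + 1) (sweepRound gB n d dist).1
      else (sweepRound gB n d dist).1 := by
  rw [sweepLoop, dite_eq_ite]

lemma level_eq_sweep (gB : List (List Int)) (n : Int)
    (hbnd : ∀ u : Int, 1 ≤ u → ∀ x ∈ PySem.List.pyGetD gB u [], 1 ≤ x ∧ x ≤ n)
    (hsym : ∀ a b : Int, 1 ≤ a → 1 ≤ b →
      (a ∈ PySem.List.pyGetD gB b [] ↔ b ∈ PySem.List.pyGetD gB a [])) :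
    ∀ (K : Nat) (F : List Int) (L : Int) (dist : List Int),
    dist.count (-1) ≤ K → 0 ≤ L → dist.length = n.toNat →
    (∀ y : Int, y ∈ F ↔ 1 ≤ y ∧ y ≤ n ∧ dist.getD (y - 1).toNat 0 = L) →
    (∀ j : Nat, j < n.toNat → dist.getD j 0 = -1 ∨ (0 ≤ dist.getD j 0 ∧ dist.getD j 0 ≤ L)) →
    bfsB gB F L dist = sweepLoop gB n L dist := by
  intro K
  induction K using Nat.strong_induction_on with
  | _ K ih =>
  intro F L dist hK hL hlen hFchar hrange
  have hL1 : (L + 1 : Int) ≠ -1 := by omega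
  have hLm : (L : Int) ≠ -1 := by omega
  have hcond : ∀ j : Nat, j < n.toNat → (relCond gB L dist j ↔
      (dist.getD j 0 = -1 ∧ ∃ u ∈ F, ((j : Int) + 1) ∈ PySem.List.pyGetD gB u [])) := by
    intro j hj
    constructor
    · rintro ⟨h1, x, hx, hxL⟩
      have hxb := hbnd ((j : Int) + 1) (by omega) x hx
      have hxF : x ∈ F := (hFchar x).mpr ⟨hxb.1, hxb.2, hxL⟩
      exact ⟨h1, x, hxF, (hsym x ((j : Int) + 1) hxb.1 (by omega)).mp hx⟩
    · rintro ⟨h1, u, hu, hmem⟩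
      obtain ⟨hu1, hu2, huL⟩ := (hFchar u).mp hu
      exact ⟨h1, u, (hsym u ((j : Int) + 1) hu1 (by omega)).mpr hmem, huL⟩
  obtain ⟨r1, r2⟩ := sweepRound_char gB n L hL hbnd dist hlen
  cases F with
  | nil =>
    rw [bfsB_nil, sweepLoop_eq]
    have hnone : ∀ j : Nat, j < n.toNat → ¬ relCond gB L dist j := by
      intro j hj hr
      obtain ⟨_, u, hu, _⟩ := (hcond j hj).mp hr
      simp at hu
    have hre : (sweepRound gB n L dist).1 = dist := by
      apply list_eq_of_getD _ _ (by rw [r1, hlen])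
      intro j hj
      rw [r2 j (by omega), if_neg (hnone j (by omega))]
    rw [hre, if_neg (lt_irrefl _)]
  | cons f F' =>
    rw [bfsB_cons gB f F' L dist hL1]
    have hFb : ∀ u ∈ f :: F', 1 ≤ u ∧ u ≤ n := fun u hu =>
      ⟨((hFchar u).mp hu).1, ((hFchar u).mp hu).2.1⟩
    obtain ⟨s1, s2, s3⟩ := stepB_char gB n (L + 1) hL1 hbnd (f :: F') hFb [] dist hlen
    have hSr : (stepB gB (L + 1) ([], dist) (f :: F')).2 = (sweepRound gB n L dist).1 := by
      apply list_eq_of_getD _ _ (by rw [s1, r1])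
      intro j hj
      have hjn : j < n.toNat := by omega
      rw [s2 j hjn, r2 j hjn]
      by_cases hr : relCond gB L dist j
      · rw [if_pos hr, if_pos ((hcond j hjn).mp hr)]
      · rw [if_neg hr, if_neg (fun h => hr ((hcond j hjn).mpr h))]
    by_cases hdisc : ∃ j : Nat, j < n.toNat ∧ relCond gB L dist j
    · have hprog : (sweepRound gB n L dist).1.count (-1) < dist.count (-1) :=
        round_progress gB n L hL hbnd dist hlen hdisc
      rw [sweepLoop_eq, if_pos hprog]
      have hnewchar : ∀ y : Int, y ∈ (stepB gB (L + 1) ([], dist) (f :: F')).1 ↔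
          1 ≤ y ∧ y ≤ n ∧ (sweepRound gB n L dist).1.getD (y - 1).toNat 0 = L + 1 := by
        intro y
        rw [s3 y]
        constructor
        · rintro (h | ⟨b1, b2, b3, b4⟩)
          · simp at h
          · refine ⟨b1, b2, ?_⟩
            have hjy : (y - 1).toNat < n.toNat := by omega
            have hcast : (((y - 1).toNat : Int)) + 1 = y := by omega
            rw [r2 (y - 1).toNat hjy,
              if_pos ((hcond (y - 1).toNat hjy).mpr ⟨b3, by rw [hcast]; exact b4⟩)]
        · rintro ⟨b1, b2, b3⟩
          have hjy : (y - 1).toNat < n.toNat := by omega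
          have hcast : (((y - 1).toNat : Int)) + 1 = y := by omega
          rw [r2 (y - 1).toNat hjy] at b3
          by_cases hr : relCond gB L dist (y - 1).toNat
          · obtain ⟨c1, c2⟩ := (hcond (y - 1).toNat hjy).mp hr
            right
            refine ⟨b1, b2, c1, ?_⟩
            rw [← hcast]
            exact c2
          · rw [if_neg hr] at b3
            rcases hrange (y - 1).toNat hjy with h | h
            · omega
            · omega
      have hK1 : 1 ≤ K := by omega
      have hrec := ih (K - 1) (by omega)
        (stepB gB (L + 1) ([], dist) (f :: F')).1 (L + 1) (sweepRound gB n L dist).1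
        (by omega) (by omega) (by rw [r1])
        hnewchar
        (by
          intro j hj
          rw [r2 j hj]
          by_cases hr : relCond gB L dist j
          · rw [if_pos hr]
            right
            omega
          · rw [if_neg hr]
            rcases hrange j hj with h | h
            · exact Or.inl h
            · right
              omega)
      rw [hSr]
      exact hrec
    · have hnoc : ∀ j : Nat, j < n.toNat → ¬ relCond gB L dist j :=
        fun j hj hr => hdisc ⟨j, hj, hr⟩
      have hre : (sweepRound gB n L dist).1 = dist := by
        apply list_eq_of_getD _ _ (by rw [r1, hlen])
        intro j hj
        rw [r2 j (by omega), if_neg (hnoc j (by omega))]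
      have hS2 : (stepB gB (L + 1) ([], dist) (f :: F')).2 = dist := by rw [hSr, hre]
      have hS1 : (stepB gB (L + 1) ([], dist) (f :: F')).1 = [] := by
        rw [List.eq_nil_iff_forall_not_mem]
        intro y hy
        rcases (s3 y).mp hy with h | ⟨b1, b2, b3, b4⟩
        · simp at h
        · have hjy : (y - 1).toNat < n.toNat := by omega
          have hcast : (((y - 1).toNat : Int)) + 1 = y := by omega
          exact hnoc (y - 1).toNat hjy
            ((hcond (y - 1).toNat hjy).mpr ⟨b3, by rw [hcast]; exact b4⟩)
      rw [hS1, hS2, bfsB_nil, sweepLoop_eq, hre, if_neg (lt_irrefl _)]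

-- B's graph is symmetric: both endpoints of every road are appended
lemma mem_road_append (n : Int) (g : List (List Int)) (hg : g.length = (n + 1).toNat)
    (p q : Int) (hp : 1 ≤ p ∧ p ≤ n) (hq : 1 ≤ q ∧ q ≤ n) (b a : Int) (hb : 1 ≤ b) :
    (a ∈ PySem.List.pyGetD (appendAt (appendAt g p q) q p) b [] ↔
      a ∈ PySem.List.pyGetD g b [] ∨ (b = q ∧ a = p) ∨ (b = p ∧ a = q)) := by
  rw [pyGetD_appendAt n (appendAt g p q) (by rw [appendAt_length]; exact hg) q hq.1 hq.2 p b hb]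
  by_cases hbq : b = q
  · rw [if_pos hbq,
      pyGetD_appendAt n g hg p hp.1 hp.2 q q hq.1]
    by_cases hqp : q = p
    · rw [if_pos hqp]
      subst hbq
      subst hqp
      simp [List.mem_append]
    · rw [if_neg hqp]
      subst hbq
      simp [List.mem_append, hqp]
  · rw [if_neg hbq,
      pyGetD_appendAt n g hg p hp.1 hp.2 q b hb]
    by_cases hbp : b = p
    · rw [if_pos hbp]
      subst hbp
      simp [List.mem_append, hbq]
    · rw [if_neg hbp]
      simp [hbq, hbp]

lemma graphB_sym_aux (n : Int) :
    ∀ (roads : List (List Int)) (g : List (List Int)),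
    (∀ r ∈ roads, 2 ≤ r.length ∧ ∀ x ∈ r.take 2, 1 ≤ x ∧ x ≤ n) →
    g.length = (n + 1).toNat →
    (∀ a b : Int, 1 ≤ a → 1 ≤ b →
      (a ∈ PySem.List.pyGetD g b [] ↔ b ∈ PySem.List.pyGetD g a [])) →
    ∀ a b : Int, 1 ≤ a → 1 ≤ b →
      (a ∈ PySem.List.pyGetD (roads.foldl (fun g road =>
          appendAt (appendAt g (PySem.List.pyGetD road 0 0) (PySem.List.pyGetD road 1 0))
            (PySem.List.pyGetD road 1 0) (PySem.List.pyGetD road 0 0)) g) b [] ↔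
       b ∈ PySem.List.pyGetD (roads.foldl (fun g road =>
          appendAt (appendAt g (PySem.List.pyGetD road 0 0) (PySem.List.pyGetD road 1 0))
            (PySem.List.pyGetD road 1 0) (PySem.List.pyGetD road 0 0)) g) a []) := by
  intro roads
  induction roads with
  | nil => intro g _ _ hsym a b ha hb; exact hsym a b ha hb
  | cons r rs ih =>
    intro g hroads hlen hsym a b ha hb
    obtain ⟨hr2, hrb⟩ := hroads r (by simp)
    match r, hr2 with
    | p :: q :: rest, _ =>
      have hp : 1 ≤ p ∧ p ≤ n := hrb p (by simp)
      have hq : 1 ≤ q ∧ q ≤ n := hrb q (by simp [List.take])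
      have hget0 : PySem.List.pyGetD (p :: q :: rest) 0 0 = p := by simp [pysem]
      have hget1 : PySem.List.pyGetD (p :: q :: rest) 1 0 = q := by
        simp [PySem.List.pyGetD, PySem.List.pyGet?, PySem.List.pyIdx?]
      simp only [List.foldl_cons, hget0, hget1]
      refine ih (appendAt (appendAt g p q) q p)
        (fun r' hr' => hroads r' (by simp [hr']))
        (by rw [appendAt_length, appendAt_length]; exact hlen) ?_ a b ha hb
      intro c e hc he
      rw [mem_road_append n g hlen p q hp hq e c he,
        mem_road_append n g hlen p q hp hq c e hc]
      have h0 := hsym c e hc he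
      tauto

lemma graphB_sym (n : Int) (roads : List (List Int))
    (hroads : ∀ r ∈ roads, 2 ≤ r.length ∧ ∀ x ∈ r.take 2, 1 ≤ x ∧ x ≤ n) :
    ∀ a b : Int, 1 ≤ a → 1 ≤ b →
      (a ∈ PySem.List.pyGetD (graphB n roads) b [] ↔
       b ∈ PySem.List.pyGetD (graphB n roads) a []) := by
  have hlen0 : ((PySem.List.pyRange 0 (n + 1) 1).map
      (fun _ => ([] : List Int))).length = (n + 1).toNat := by
    simp [PySem.List.length_pyRange_one]
  have hsym0 : ∀ a b : Int, 1 ≤ a → 1 ≤ b →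
      (a ∈ PySem.List.pyGetD ((PySem.List.pyRange 0 (n + 1) 1).map
          (fun _ => ([] : List Int))) b [] ↔
       b ∈ PySem.List.pyGetD ((PySem.List.pyRange 0 (n + 1) 1).map
          (fun _ => ([] : List Int))) a []) := by
    intro a b _ _
    rw [pyGetD_all_eq _ _ (by intro x hx; simp only [List.mem_map] at hx; exact hx.choose_spec.2.symm),
      pyGetD_all_eq _ _ (by intro x hx; simp only [List.mem_map] at hx; exact hx.choose_spec.2.symm)]
    simp
  exact graphB_sym_aux n roads _ hroads hlen0 hsym0

-- ===== VERDICT (by name: the statement is the Claim_ definition above) =====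
theorem solution_spec : Claim_equal_solution := by
  intro n roads sources destination hDom hPre
  obtain ⟨hd1, hd2, hroads, hsrc⟩ := hPre
  unfold Spec_solution
  rw [A_eq_level n roads sources destination ⟨hd1, hd2, hroads, hsrc⟩]
  simp only [solution_alt]
  rw [pySetD_set (List.replicate n.toNat (-1)) destination hd1 0]
  have hgbnd : ∀ u : Int, 1 ≤ u →
      ∀ x ∈ PySem.List.pyGetD (graphB n roads) u [], 1 ≤ x ∧ x ≤ n := by
    intro u hu
    rw [← (graphs_rel n roads hroads).1 u hu]
    exact (graphs_rel n roads hroads).2 u hu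
  have hsym := graphB_sym n roads hroads
  have hjd0 : (destination - 1).toNat < (List.replicate n.toNat (-1 : Int)).length := by
    simp; omega
  have hkey := level_eq_sweep (graphB n roads) n hgbnd hsym
    (((List.replicate n.toNat (-1 : Int)).set (destination - 1).toNat 0).count (-1))
    [destination] 0
    ((List.replicate n.toNat (-1 : Int)).set (destination - 1).toNat 0)
    le_rfl (by omega) (by simp)
    (by
      intro y
      constructor
      · intro hy
        simp at hy
        subst hy
        refine ⟨hd1, hd2, ?_⟩
        rw [getD_set _ _ hjd0 0 _ 0, if_pos rfl]
      · rintro ⟨hy1, hy2, hy3⟩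
        rw [getD_set _ _ hjd0 0 _ 0] at hy3
        by_cases hjj : (y - 1).toNat = (destination - 1).toNat
        · simp
          omega
        · rw [if_neg hjj, List.getD_replicate _ (by omega)] at hy3
          omega)
    (by
      intro j hj
      rw [getD_set _ _ hjd0 0 j 0]
      by_cases hjj : j = (destination - 1).toNat
      · rw [if_pos hjj]; right; omega
      · rw [if_neg hjj, List.getD_replicate _ (by omega)]; left; rfl)
  rw [hkey]
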